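-- pv_equiv track=rewrite | github.com/SunwoongH/algorithm | Programmers/PCCP/외톨이 알파벳.py | solution
-- ===== SOURCE A (Python) =====
-- from collections import Counter
--
-- def solution(input_string):
--     stack = []
--     for char in input_string:
--         if stack and stack[-1] == char:
--             continue
--         stack.append(char)
--     count = Counter(stack)
--     promising = list(filter(lambda x: x[1] > 1, count.most_common()))
--     if not promising:
--         return "N"
--     return ''.join(sorted(map(lambda x: x[0], promising)))
-- ===== SOURCE B (Python) =====
-- def solution(input_string):
--     def lonely(c):
--         i, n = 0, len(input_string)
--         while i < n and input_string[i] != c: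
--             i += 1
--         while i < n and input_string[i] == c:
--             i += 1
--         return c in input_string[i:]
--     res = ''.join(c for c in sorted(set(input_string)) if lonely(c))
--     return res or 'N'
-- ===== Notes on version B (the rewrite author's own statement) =====
-- stated objective: alternative
-- what changed: Instead of run-compressing the string and counting run heads with a Counter, B tests each distinct character independently: skip the prefix before and through that character's first run, then check whether the character still occurs in the remainder; no compressed list and no counting are ever built.
import Mathlib
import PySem

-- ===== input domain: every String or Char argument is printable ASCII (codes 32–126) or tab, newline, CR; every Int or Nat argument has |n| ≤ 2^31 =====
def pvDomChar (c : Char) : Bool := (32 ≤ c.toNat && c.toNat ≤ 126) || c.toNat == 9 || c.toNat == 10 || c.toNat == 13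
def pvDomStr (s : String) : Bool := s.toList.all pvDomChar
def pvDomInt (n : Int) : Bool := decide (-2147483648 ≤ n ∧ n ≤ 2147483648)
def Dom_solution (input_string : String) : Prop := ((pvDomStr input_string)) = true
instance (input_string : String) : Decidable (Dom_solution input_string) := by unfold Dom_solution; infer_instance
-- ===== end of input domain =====

-- B abandons A's run-compressed list + Counter: for each distinct character it skips the
-- prefix before and through that character's first run and tests membership in the rest;
-- objective: alternative (different algorithm, no compression/counting).


-- ===== PORT A =====
-- stack loop; Counter = PySem.Dict.counter; most_common = stable sort by count descending;
-- ''.join over characters = String.ofList.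
def solution (input_string : String) : String :=
  let stack := input_string.toList.foldl
    (fun stack char =>
      if stack ≠ [] ∧ stack.getLast? = some char then stack else stack ++ [char]) []
  let count := PySem.Dict.counter stack
  let promising := (PySem.List.sorted count.items (fun x => x.2) true).filter
    (fun x => decide (1 < x.2))
  if promising = [] then "N"
  else String.ofList (PySem.List.sorted (promising.map (fun x => x.1)) (fun x => x))

-- ===== PORT B =====
-- lonely c: the two index-advancing while loops skip "while != c" then "while == c",
-- i.e. dropWhile (· != c) then dropWhile (· == c); 'c in input_string[i:]' = contains on the rest.
def lonelyB (l : List Char) (c : Char) : Bool :=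
  ((l.dropWhile (fun x => x != c)).dropWhile (fun x => x == c)).contains c

-- sorted(set(s)) filtered by lonely, joined; '' or 'N'.
def solution_alt (input_string : String) : String :=
  let res := String.ofList
    ((PySem.List.sorted (PySem.Set.ofList input_string.toList) (fun x => x)).filter
      (lonelyB input_string.toList))
  if res = "" then "N" else res

-- ===== PRECONDITION & SPEC =====
def Spec_solution (input_string : String) (out : String) : Prop := out = solution_alt input_string
instance (input_string : String) (out : String) : Decidable (Spec_solution input_string out) := by unfold Spec_solution; infer_instance

-- ===== CLAIM (what is proved, stated in full; the proofs are below) =====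
def Claim_equal_solution : Prop := ∀ (input_string : String), Dom_solution input_string → Spec_solution input_string (solution input_string)

-- ===== LEMMAS AND PROOFS =====

-- proof-only recursive run-compression (head of each maximal run)
def runsR : List Char → List Char
  | [] => []
  | a :: t => a :: runsR (t.dropWhile (fun x => x == a))
termination_by l => l.length
decreasing_by
  exact Nat.lt_succ_of_le (List.length_dropWhile_le _ _)

-- A's foldl stack equals ys ++ [b] ++ runsR of the remainder after dropping b's current run
lemma foldl_stack_eq (l : List Char) : ∀ (ys : List Char) (b : Char),
    l.foldl (fun stack char =>
      if stack ≠ [] ∧ stack.getLast? = some char then stack else stack ++ [char]) (ys ++ [b])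
    = ys ++ [b] ++ runsR (l.dropWhile (fun x => x == b)) := by
  induction l with
  | nil => intro ys b; simp [runsR]
  | cons x t ih =>
      intro ys b
      by_cases h : x = b
      · subst h
        rw [List.foldl_cons, if_pos (by simp)]
        simpa using ih ys x
      · have hbx : ¬ b = x := fun e => h e.symm
        rw [List.foldl_cons, if_neg (by simp [hbx])]
        have := ih (ys ++ [b]) x
        simp only [List.append_assoc] at this ⊢
        rw [this]
        have hxb : (x == b) = false := by simp [h]
        simp [List.dropWhile, hxb, runsR]

lemma stack_eq_runsR (l : List Char) :
    l.foldl (fun stack char =>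
      if stack ≠ [] ∧ stack.getLast? = some char then stack else stack ++ [char]) []
    = runsR l := by
  cases l with
  | nil => simp [runsR]
  | cons a t =>
      rw [List.foldl_cons, if_neg (by simp)]
      simpa [runsR] using foldl_stack_eq t [] a

lemma mem_dropWhile_of_ne {l : List Char} {a c : Char} (h : c ≠ a) :
    c ∈ l.dropWhile (fun x => x == a) ↔ c ∈ l := by
  induction l with
  | nil => simp
  | cons x t ih =>
      by_cases hx : x = a
      · subst hx; simpa [List.dropWhile_cons, h] using ih
      · simp [hx]

lemma mem_runsR {c : Char} : ∀ {l : List Char}, c ∈ runsR l ↔ c ∈ l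
  | [] => by simp [runsR]
  | a :: t => by
      by_cases h : c = a
      · simp [runsR, h]
      · rw [runsR]
        simp only [List.mem_cons, h, false_or]
        rw [mem_runsR (l := t.dropWhile (fun x => x == a)), mem_dropWhile_of_ne h]
termination_by l => l.length
decreasing_by
  exact Nat.lt_succ_of_le (List.length_dropWhile_le _ _)

-- key characterisation: c heads at least two runs  ↔  B's skip-skip-membership test
lemma dropWhile_eq_then_ne {a c : Char} (h : ¬ a = c) (t : List Char) :
    (t.dropWhile (fun x => x == a)).dropWhile (fun x => x != c)
      = t.dropWhile (fun x => x != c) := by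
  induction t with
  | nil => rfl
  | cons y r ih =>
      by_cases hy : y = a
      · subst hy
        rw [List.dropWhile_cons, List.dropWhile_cons]
        simpa [h] using ih
      · rw [List.dropWhile_cons]
        simp [hy]

lemma count_runsR_iff {c : Char} : ∀ {l : List Char},
    2 ≤ (runsR l).count c ↔ lonelyB l c = true
  | [] => by simp [runsR, lonelyB]
  | a :: t => by
      rw [runsR]
      by_cases h : a = c
      · subst h
        rw [List.count_cons_self]
        have h1 : (0 < (runsR (t.dropWhile (fun x => x == a))).count a) ↔
            a ∈ t.dropWhile (fun x => x == a) := by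
          rw [List.count_pos_iff, mem_runsR]
        have h2 : lonelyB (a :: t) a
            = (t.dropWhile (fun x => x == a)).contains a := by
          simp [lonelyB]
        have h3 : (t.dropWhile (fun x => x == a)).contains a = true ↔
            a ∈ t.dropWhile (fun x => x == a) := by simp
        rw [h2, h3, ← h1]
        omega
      · rw [List.count_cons_of_ne h,
           count_runsR_iff (l := t.dropWhile (fun x => x == a))]
        have h2 : lonelyB (t.dropWhile (fun x => x == a)) c = lonelyB (a :: t) c := by
          unfold lonelyB
          rw [dropWhile_eq_then_ne h t, List.dropWhile_cons]
          have hne : (a != c) = true := by simp [h]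
          simp [hne]
        rw [h2]
termination_by l => l.length
decreasing_by
  exact Nat.lt_succ_of_le (List.length_dropWhile_le _ _)

-- String.ofList is empty only on []
lemma ofList_eq_empty_iff (xs : List Char) : String.ofList xs = "" ↔ xs = [] := by
  constructor
  · intro h
    have := congrArg String.toList h
    simpa using this
  · intro h; rw [h]

theorem solution_spec : Claim_equal_solution := by
  intro s _
  unfold Spec_solution solution solution_alt
  simp only [stack_eq_runsR]
  set l := s.toList with hl
  set stack := runsR l with hstack
  set p : Char × Int → Bool := fun x => decide (1 < x.2) with hp
  set X := (PySem.Set.ofList stack).filter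
    (fun k => decide ((1 : Int) < (stack.count k : Int))) with hX
  set Y := (PySem.Set.ofList l).filter (lonelyB l) with hY
  set Pf := (PySem.List.sorted (PySem.Dict.counter stack).items (fun x => x.2) true).filter p
    with hPf
  set Lb := (PySem.List.sorted (PySem.Set.ofList l) (fun x => x)).filter (lonelyB l) with hLb
  have hitems : (((PySem.Dict.counter stack).items.filter p).map (fun x => x.1)) = X := by
    rw [PySem.Dict.items_counter, List.filter_map, List.map_map]
    simp [hp, hX, Function.comp_def]
  have hpermA : (Pf.map (fun x => x.1)).Perm X := by
    rw [← hitems, hPf]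
    exact ((PySem.List.sorted_perm _ _ _).filter p).map _
  have hXY : X.Perm Y := by
    have hnX : X.Nodup := (PySem.Set.nodup_ofList _).filter _
    have hnY : Y.Nodup := (PySem.Set.nodup_ofList _).filter _
    rw [List.perm_ext_iff_of_nodup hnX hnY]
    intro c
    have hcount : (2 ≤ stack.count c) ↔ lonelyB l c = true := count_runsR_iff
    rw [hX, hY, List.mem_filter, List.mem_filter, PySem.Set.mem_ofList, PySem.Set.mem_ofList]
    constructor
    · intro hc
      have h1 : (1 : Int) < (stack.count c : Int) := of_decide_eq_true hc.2
      have h2 : 2 ≤ stack.count c := by exact_mod_cast h1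
      exact ⟨mem_runsR.mp (List.count_pos_iff.mp (lt_of_lt_of_le (by decide : (0:Nat) < 2) h2)), hcount.mp h2⟩
    · intro hc
      have h2 : 2 ≤ stack.count c := hcount.mpr hc.2
      refine ⟨List.count_pos_iff.mp (lt_of_lt_of_le (by decide : (0:Nat) < 2) h2),
        decide_eq_true (show (1 : Int) < (stack.count c : Int) by exact_mod_cast h2)⟩
  have hA : PySem.List.sorted (Pf.map (fun x => x.1)) (fun x => x)
      = PySem.List.sorted Y (fun x => x) :=
    PySem.List.sorted_eq_sorted_of_perm _ _ _ (fun _ _ h => h) (hpermA.trans hXY)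
  have hB : PySem.List.sorted Y (fun x => x) = Lb := by
    apply PySem.List.sorted_eq_of_perm_of_pairwise_lt
    · exact (PySem.List.sorted_perm _ _ _).filter _
    · exact (PySem.List.sorted_ofList_pairwise_lt l).filter _
  have hAB : PySem.List.sorted (Pf.map (fun x => x.1)) (fun x => x) = Lb := hA.trans hB
  have hlength : Pf.length = Lb.length := by
    have := congrArg List.length hAB
    simpa [PySem.List.length_sorted] using this
  by_cases hP : Pf = []
  · have hLbe : Lb = [] := List.length_eq_zero_iff.mp (by rw [← hlength, hP]; rfl)
    rw [if_pos hP, if_pos ((ofList_eq_empty_iff Lb).mpr hLbe)]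
  · have hLbe : ¬ Lb = [] := fun h =>
      hP (List.length_eq_zero_iff.mp (by rw [hlength, h]; rfl))
    rw [if_neg hP, if_neg (fun h => hLbe ((ofList_eq_empty_iff Lb).mp h)), hAB]
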